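-- pv_equiv track=rewrite | github.com/VelkovIv/Programing-Fundamentals-with-Python-September-2022-in-SoftUni | 08.text_processing_exe/02.character_multiplier.py | characters_multiplier_func
-- ===== SOURCE A (Python) =====
-- def characters_multiplier_func(left_string, right_string):
--     total_sum = 0
--     if len(left_string) == len(right_string):
--         for index in range(len(left_string)):
--             total_sum += ord(left_string[index]) * ord(right_string[index])
--
--     elif len(left_string) > len(right_string):
--         for index in range(len(right_string)):
--             total_sum += ord(left_string[index]) * ord(right_string[index])
--
--         second_pass = len(left_string) - len(right_string)
--
--         for index in range(second_pass):
--             new_index = len(right_string) + index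
--             total_sum += ord(left_string[new_index])
--     else:
--         for index in range(len(left_string)):
--             total_sum += ord(left_string[index]) * ord(right_string[index])
--
--         second_pass = len(right_string) - len(left_string)
--
--         for index in range(second_pass):
--             new_index = len(left_string) + index
--             total_sum += ord(right_string[new_index])
--
--     return total_sum
-- ===== SOURCE B (Python) =====
-- def characters_multiplier_func(left_string, right_string):
--     # Pad the shorter string with chr(1) (multiplicative identity for ord),
--     # so a single uniform product loop covers both the common part and the
--     # leftover tail: ord(c) * ord('\x01') == ord(c).
--     n = max(len(left_string), len(right_string))
--     l = left_string.ljust(n, '\x01')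
--     r = right_string.ljust(n, '\x01')
--     total = 0
--     for a, b in zip(l, r):
--         total += ord(a) * ord(b)
--     return total
-- ===== Notes on version B (the rewrite author's own statement) =====
-- stated objective: alternative
-- what changed: Replaces A's three-way length-case dispatch with four index loops by padding the shorter string with the multiplicative-identity character chr(1) and running one uniform ord-product loop, eliminating tail handling entirely.
import Mathlib
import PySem

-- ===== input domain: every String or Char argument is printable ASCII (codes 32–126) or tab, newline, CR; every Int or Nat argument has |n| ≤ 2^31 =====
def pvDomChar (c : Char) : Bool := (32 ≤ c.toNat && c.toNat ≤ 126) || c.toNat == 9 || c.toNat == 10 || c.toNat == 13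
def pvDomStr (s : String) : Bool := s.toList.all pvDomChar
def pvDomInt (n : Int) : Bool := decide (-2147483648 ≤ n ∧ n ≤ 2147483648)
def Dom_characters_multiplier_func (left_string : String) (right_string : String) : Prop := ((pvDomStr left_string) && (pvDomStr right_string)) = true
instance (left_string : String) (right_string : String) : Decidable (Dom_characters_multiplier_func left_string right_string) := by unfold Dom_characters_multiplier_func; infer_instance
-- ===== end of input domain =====

-- B pads the shorter string with the multiplicative-identity character chr 1 and runs one
-- uniform ord-product loop, replacing A's three-way length dispatch; objective: alternative.

-- ===== PORT A =====
def characters_multiplier_func (left_string : String) (right_string : String) : Int :=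
  let l := left_string.toList
  let r := right_string.toList
  let total_sum : Int := 0
  if l.length = r.length then
    (PySem.List.pyRange 0 (l.length : Int) 1).foldl
      (fun acc i => acc + ((PySem.List.pyGetD l i ' ').toNat : Int) * ((PySem.List.pyGetD r i ' ').toNat : Int)) total_sum
  else if l.length > r.length then
    let t1 := (PySem.List.pyRange 0 (r.length : Int) 1).foldl
      (fun acc i => acc + ((PySem.List.pyGetD l i ' ').toNat : Int) * ((PySem.List.pyGetD r i ' ').toNat : Int)) total_sum
    let second_pass : Int := (l.length : Int) - (r.length : Int)
    (PySem.List.pyRange 0 second_pass 1).foldl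
      (fun acc i => acc + ((PySem.List.pyGetD l ((r.length : Int) + i) ' ').toNat : Int)) t1
  else
    let t1 := (PySem.List.pyRange 0 (l.length : Int) 1).foldl
      (fun acc i => acc + ((PySem.List.pyGetD l i ' ').toNat : Int) * ((PySem.List.pyGetD r i ' ').toNat : Int)) total_sum
    let second_pass : Int := (r.length : Int) - (l.length : Int)
    (PySem.List.pyRange 0 second_pass 1).foldl
      (fun acc i => acc + ((PySem.List.pyGetD r ((l.length : Int) + i) ' ').toNat : Int)) t1

-- ===== PORT B =====
-- str.ljust(n, c) is ported as appending 'List.replicate (n - len) c' (exact for len ≤ n, which holds here).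
def characters_multiplier_func_alt (left_string : String) (right_string : String) : Int :=
  let l := left_string.toList
  let r := right_string.toList
  let n := max l.length r.length
  let l' := l ++ List.replicate (n - l.length) '\x01'
  let r' := r ++ List.replicate (n - r.length) '\x01'
  (l'.zip r').foldl (fun acc p => acc + ((p.1.toNat : Int)) * ((p.2.toNat : Int))) 0

-- ===== PRECONDITION & SPEC =====
def Spec_characters_multiplier_func (left_string : String) (right_string : String) (out : Int) : Prop := out = characters_multiplier_func_alt left_string right_string
instance (left_string : String) (right_string : String) (out : Int) : Decidable (Spec_characters_multiplier_func left_string right_string out) := by unfold Spec_characters_multiplier_func; infer_instance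

-- ===== CLAIM (what is proved, stated in full; the proofs are below) =====
def Claim_equal_characters_multiplier_func : Prop := ∀ (left_string : String) (right_string : String), Dom_characters_multiplier_func left_string right_string → Spec_characters_multiplier_func left_string right_string (characters_multiplier_func left_string right_string)

-- ===== LEMMAS AND PROOFS =====

-- the range-indexed product sum over the common prefix equals the zip sum
theorem pv_rangeProd_eq_zipSum (l r : List Char) (n : Nat) (hn : n = min l.length r.length) :
    ((List.range n).map (fun k => (((l[k]?.getD ' ').toNat : Int)) * (((r[k]?.getD ' ').toNat : Int)))).sum
      = ((l.zip r).map (fun p => ((p.1.toNat : Int) * (p.2.toNat : Int)))).sum := by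
  subst hn
  induction l generalizing r with
  | nil => simp
  | cons a l ih =>
    cases r with
    | nil => simp
    | cons b r =>
      simp [List.range_succ_eq_map, List.map_map, Function.comp_def, Nat.succ_min_succ, ih r]

-- the range-indexed sum of a full list equals its map-sum
theorem pv_rangeSum_eq_mapSum (xs : List Char) :
    ((List.range xs.length).map (fun k => (((xs[k]?.getD ' ').toNat : Int)))).sum
      = (xs.map (fun c => (c.toNat : Int))).sum := by
  induction xs with
  | nil => simp
  | cons a xs ih =>
    simp [List.range_succ_eq_map, List.map_map, Function.comp_def, ih]

-- A's second loop (shifted Int indices from the length of the shorter string) sums the dropped tail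
theorem pv_tailSum (xs : List Char) (m : Nat) :
    ((List.range (xs.length - m)).map
        (fun (x : Nat) => ((PySem.List.pyGetD xs ((m : Int) + (x : Int)) ' ').toNat : Int))).sum
      = ((xs.drop m).map (fun c => (c.toNat : Int))).sum := by
  have h : ∀ x : Nat, PySem.List.pyGetD xs ((m : Int) + (x : Int)) ' ' = (xs.drop m)[x]?.getD ' ' := by
    intro x
    rw [← Nat.cast_add, PySem.List.pyGetD_natCast]
    simp [List.getElem?_drop]
  simp only [h]
  rw [show xs.length - m = (xs.drop m).length by simp]
  exact pv_rangeSum_eq_mapSum _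

-- products against the identity pad are the plain ords (right side)
theorem pv_zip_pad_right (xs : List Char) :
    (((xs.zip (List.replicate xs.length '\x01')).map
        (fun p => ((p.1.toNat : Int)) * ((p.2.toNat : Int)))).sum)
      = (xs.map (fun c => (c.toNat : Int))).sum := by
  induction xs with
  | nil => simp
  | cons a xs ih => simp [List.replicate_succ, ih]

-- products against the identity pad are the plain ords (left side)
theorem pv_zip_pad_left (xs : List Char) :
    ((((List.replicate xs.length '\x01').zip xs).map
        (fun p => ((p.1.toNat : Int)) * ((p.2.toNat : Int)))).sum)
      = (xs.map (fun c => (c.toNat : Int))).sum := by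
  induction xs with
  | nil => simp
  | cons a xs ih => simp [List.replicate_succ, ih]

-- B's padded uniform product sum decomposes into the common zip sum plus both tail sums
theorem pv_pad_zip (l r : List Char) :
    (((l ++ List.replicate (max l.length r.length - l.length) '\x01').zip
        (r ++ List.replicate (max l.length r.length - r.length) '\x01')).map
        (fun p => ((p.1.toNat : Int)) * ((p.2.toNat : Int)))).sum
      = ((l.zip r).map (fun p => ((p.1.toNat : Int) * (p.2.toNat : Int)))).sum
        + ((l.drop r.length).map (fun c => (c.toNat : Int))).sum
        + ((r.drop l.length).map (fun c => (c.toNat : Int))).sum := by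
  induction l generalizing r with
  | nil =>
    simp [pv_zip_pad_left r]
  | cons a l ih =>
    cases r with
    | nil =>
      simpa using pv_zip_pad_right (a :: l)
    | cons b r =>
      simp only [List.length_cons, List.cons_append, List.zip_cons_cons,
        List.map_cons, List.sum_cons, List.drop_succ_cons]
      rw [show max (l.length + 1) (r.length + 1) - (l.length + 1) = max l.length r.length - l.length by omega,
        show max (l.length + 1) (r.length + 1) - (r.length + 1) = max l.length r.length - r.length by omega,
        ih r]
      ring

-- ===== VERDICT (by name: the statement is the Claim_ definition above) =====
theorem characters_multiplier_func_spec : Claim_equal_characters_multiplier_func := by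
  intro L R _
  unfold Spec_characters_multiplier_func characters_multiplier_func characters_multiplier_func_alt
  set l := L.toList with hl
  set r := R.toList with hr
  simp only [PySem.List.pyRange_one, Int.sub_zero, Int.toNat_natCast, List.foldl_map,
    PySem.List.foldl_add, PySem.List.pyGetD_natCast, zero_add]
  rw [pv_pad_zip l r]
  by_cases h1 : l.length = r.length
  · simp only [h1, lt_irrefl, ite_true, List.getD]
    rw [pv_rangeProd_eq_zipSum l r r.length (by omega)]
    simp [List.drop_of_length_le (le_of_eq h1)]
  · simp only [if_neg h1]
    by_cases h2 : l.length > r.length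
    · simp only [if_pos h2, gt_iff_lt, List.getD]
      rw [show ((l.length : Int) - (r.length : Int)).toNat = l.length - r.length by omega,
        pv_rangeProd_eq_zipSum l r r.length (by omega), pv_tailSum l r.length,
        List.drop_of_length_le (le_of_lt h2)]
      simp
    · simp only [if_neg h2, gt_iff_lt, List.getD]
      rw [show ((r.length : Int) - (l.length : Int)).toNat = r.length - l.length by omega,
        pv_rangeProd_eq_zipSum l r l.length (by omega), pv_tailSum r l.length,
        List.drop_of_length_le (by omega : l.length ≤ r.length)]
      simp
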